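-- pv_equiv track=rewrite | github.com/runzedong/Leetcode_record | CodeJam2016/codejam_qualify/problem2.py | solution
-- ===== SOURCE A (Python) =====
-- def solution(s):
-- 	"""
-- 	type n:str
-- 	rtype :int
-- 	"""
-- 	if not s or len(s)==0:
-- 		return 0
-- 	if s[0] is "-":
-- 		dp=1
-- 	else:
-- 		dp=0
-- 	for i in range(1,len(s)):
-- 		if s[i]=="+":
-- 			continue
-- 		else:
-- 			if s[i-1]=="+":
-- 				dp+=2
-- 			else:
-- 				continue
-- 	return dp
-- ===== SOURCE B (Python) =====
-- def solution(s):
--     pieces = s.split('+')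
--     score = 2 * sum(1 for p in pieces[1:] if p)
--     if pieces[0].startswith('-'):
--         score += 1
--     return score
-- ===== Notes on version B (the rewrite author's own statement) =====
-- stated objective: idiomatic
-- what changed: B replaces A's indexed scan comparing each position to its predecessor by splitting the string on the happy character and counting the non-empty later pieces (run-based formulation), plus one when the first piece starts unhappy.
import Mathlib
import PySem

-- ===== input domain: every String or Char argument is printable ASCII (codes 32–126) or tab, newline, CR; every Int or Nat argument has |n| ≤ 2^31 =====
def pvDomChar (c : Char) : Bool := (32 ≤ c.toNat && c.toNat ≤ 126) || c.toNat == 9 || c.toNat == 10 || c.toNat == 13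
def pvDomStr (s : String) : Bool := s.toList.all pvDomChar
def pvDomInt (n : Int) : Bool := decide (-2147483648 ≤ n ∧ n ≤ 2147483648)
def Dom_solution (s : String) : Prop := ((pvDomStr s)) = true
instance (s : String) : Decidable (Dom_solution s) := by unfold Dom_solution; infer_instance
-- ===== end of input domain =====

-- B replaces A's per-index predecessor scan by splitting on '+' and counting the non-empty
-- later pieces (idiomatic run-based formulation); return values proved equal on all strings.

-- ===== PORT A =====
-- literal transliteration of A: guard, dp init from s[0], indexed loop over range(1, len(s))
def solution (s : String) : Int :=
  let cs := s.toList
  if cs.isEmpty || cs.length == 0 then 0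
  else
    let dp : Int := if PySem.List.pyGetD cs 0 ' ' = '-' then 1 else 0
    (PySem.List.pyRange 1 (PySem.Str.len s) 1).foldl
      (fun dp i =>
        if PySem.List.pyGetD cs i ' ' = '+' then dp
        else if PySem.List.pyGetD cs (i - 1) ' ' = '+' then dp + 2 else dp)
      dp

-- ===== PORT B =====
-- literal transliteration of Source B: pieces = s.split('+'); 2 * (# nonempty pieces after the
-- first) + 1 if the first piece starts with '-'
def solution_alt (s : String) : Int :=
  let pieces := PySem.Chars.splitOn s.toList ['+']
  let score : Int := 2 * ((pieces.drop 1).countP (fun p => !p.isEmpty) : Int)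
  if PySem.Chars.startswith (PySem.List.pyGetD pieces 0 []) ['-'] then score + 1 else score

-- ===== PRECONDITION & SPEC =====
def Spec_solution (s : String) (out : Int) : Prop := out = solution_alt s
instance (s : String) (out : Int) : Decidable (Spec_solution s out) := by unfold Spec_solution; infer_instance

-- ===== CLAIM (what is proved, stated in full; the proofs are below) =====
def Claim_equal_solution : Prop := ∀ (s : String), Dom_solution s → Spec_solution s (solution s)

-- ===== LEMMAS AND PROOFS =====

def pieces : List Char → List (List Char)
  | [] => [[]]
  | c :: rest =>
    if c = '+' then [] :: pieces rest
    else
      match pieces rest with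
      | [] => [[c]]
      | p :: ps => (c :: p) :: ps

lemma pieces_ne_nil (l : List Char) : pieces l ≠ [] := by
  cases l with
  | nil => simp [pieces]
  | cons c rest =>
    simp only [pieces]
    split
    · simp
    · split <;> simp

lemma splitOn_go_eq (l : List Char) : ∀ (fuel : Nat) (cur : List Char) (acc : List (List Char)),
    l.length < fuel →
    PySem.Chars.splitOn.go ['+'] fuel l cur acc
      = acc.reverse ++ ((cur.reverse ++ (pieces l).headI) :: (pieces l).tail) := by
  induction l with
  | nil =>
    intro fuel cur acc h
    cases fuel with
    | zero => omega
    | succ f => rw [PySem.Chars.splitOn.go]; simp [pieces]; omega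
  | cons c rest ih =>
    intro fuel cur acc h
    cases fuel with
    | zero => omega
    | succ f =>
      by_cases hc : c = '+'
      · subst hc
        rw [PySem.Chars.splitOn.go]
        simp only [List.isPrefixOf, BEq.rfl, Bool.true_and, List.isPrefixOf_nil_left, if_true,
          List.length_singleton, List.drop_one, List.tail_cons]
        rw [ih f [] (cur.reverse :: acc) (by simp at h; omega)]
        have hne := pieces_ne_nil rest
        obtain ⟨p, ps, hp⟩ : ∃ p ps, pieces rest = p :: ps := by
          cases hq : pieces rest with
          | nil => exact absurd hq hne
          | cons a b => exact ⟨a, b, rfl⟩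
        simp [pieces, hp]
      · rw [PySem.Chars.splitOn.go]
        simp only [List.isPrefixOf, List.isPrefixOf_nil_left, Bool.and_true]
        rw [if_neg (by simp [Ne.symm hc])]
        rw [ih f (c :: cur) acc (by simp at h ⊢; omega)]
        have hne := pieces_ne_nil rest
        obtain ⟨p, ps, hp⟩ : ∃ p ps, pieces rest = p :: ps := by
          cases hq : pieces rest with
          | nil => exact absurd hq hne
          | cons a b => exact ⟨a, b, rfl⟩
        simp [pieces, hp, hc]

lemma splitOn_eq_pieces (l : List Char) : PySem.Chars.splitOn l ['+'] = pieces l := by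
  rw [PySem.Chars.splitOn, splitOn_go_eq l (l.length + 1) [] [] (by omega)]
  have hne := pieces_ne_nil l
  cases hq : pieces l with
  | nil => exact absurd hq hne
  | cons a b => simp

def pairC : Char → List Char → Int
  | _, [] => 0
  | prev, y :: ys => (if y ≠ '+' ∧ prev = '+' then 2 else 0) + pairC y ys

lemma foldA (suf : List Char) : ∀ (pre : List Char) (h : pre ≠ []) (dp : Int),
    (PySem.List.pyRange (pre.length : Int) (((pre ++ suf).length : Nat) : Int) 1).foldl
      (fun dp i =>
        if PySem.List.pyGetD (pre ++ suf) i ' ' = '+' then dp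
        else if PySem.List.pyGetD (pre ++ suf) (i - 1) ' ' = '+' then dp + 2 else dp)
      dp = dp + pairC (pre.getLast h) suf := by
  induction suf with
  | nil =>
    intro pre h dp
    rw [PySem.List.pyRange_one_eq_nil (by simp)]
    simp [pairC]
  | cons y ys ih =>
    intro pre h dp
    rw [PySem.List.pyRange_one_cons (by simp)]
    rw [List.foldl_cons]
    have hy : PySem.List.pyGetD (pre ++ y :: ys) (pre.length : Int) ' ' = y := by
      rw [PySem.List.pyGetD_natCast]
      simp [List.getD, List.getElem?_append_right (le_refl pre.length)]
    have hprev : PySem.List.pyGetD (pre ++ y :: ys) ((pre.length : Int) - 1) ' ' = pre.getLast h := by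
      have hl : 0 < pre.length := List.length_pos_iff.mpr h
      have : (pre.length : Int) - 1 = ((pre.length - 1 : Nat) : Int) := by omega
      rw [this, PySem.List.pyGetD_natCast]
      rw [List.getD_eq_getElem _ _ (by simp; omega)]
      rw [List.getElem_append_left (by omega)]
      exact (List.getLast_eq_getElem h).symm
    have hstep : ∀ dp' : Int,
        (if PySem.List.pyGetD (pre ++ y :: ys) (pre.length : Int) ' ' = '+' then dp'
         else if PySem.List.pyGetD (pre ++ y :: ys) ((pre.length : Int) - 1) ' ' = '+' then dp' + 2 else dp')
        = dp' + (if y ≠ '+' ∧ pre.getLast h = '+' then 2 else 0) := by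
      intro dp'
      rw [hy, hprev]
      by_cases h1 : y = '+' <;> by_cases h2 : pre.getLast h = '+' <;> simp [h1, h2]
    rw [hstep]
    have happ : pre ++ y :: ys = (pre ++ [y]) ++ ys := by simp
    have hlen : (pre.length : Int) + 1 = ((pre ++ [y]).length : Int) := by simp
    rw [happ, hlen]
    have hlen2 : (((pre ++ y :: ys).length : Nat) : Int) = (((pre ++ [y]) ++ ys).length : Int) := by simp
    rw [ih (pre ++ [y]) (by simp) _]
    have hg : (pre ++ [y]).getLast (by simp) = y := by
      simp [List.getLast_append_of_ne_nil]
    rw [hg]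
    simp only [pairC]
    ring

lemma pairC_pieces (xs : List Char) : ∀ (prev : Char),
    pairC prev xs = 2 * (((pieces xs).tail.countP (fun p => !p.isEmpty) : Nat) : Int)
      + (if prev = '+' ∧ (pieces xs).headI ≠ [] then 2 else 0) := by
  induction xs with
  | nil => intro prev; simp [pairC, pieces]
  | cons y ys ih =>
    intro prev
    obtain ⟨p, ps, hp⟩ : ∃ p ps, pieces ys = p :: ps := by
      cases hq : pieces ys with
      | nil => exact absurd hq (pieces_ne_nil ys)
      | cons a b => exact ⟨a, b, rfl⟩
    by_cases hy : y = '+'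
    · subst hy
      simp only [pairC, pieces, if_pos rfl, List.tail_cons, List.headI_cons, ne_eq,
        not_true_eq_false, false_and, if_neg (by simp : ¬(prev = '+' ∧ ¬(([] : List Char) = []))), add_zero]
      rw [ih '+', hp]
      by_cases hpe : p = [] <;> simp [hpe, List.countP_cons] <;> ring
    · simp only [pairC, pieces, if_neg hy, hp]
      rw [ih y]
      simp [hy, hp]
      by_cases hprev : prev = '+' <;> simp [hprev] <;> ring

lemma foldA1 (x : Char) (xs : List Char) (dp : Int) :
    (PySem.List.pyRange 1 ((xs.length + 1 : Nat) : Int) 1).foldl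
      (fun dp i =>
        if PySem.List.pyGetD (x :: xs) i ' ' = '+' then dp
        else if PySem.List.pyGetD (x :: xs) (i - 1) ' ' = '+' then dp + 2 else dp)
      dp = dp + pairC x xs := by
  have h := foldA xs [x] (by simp) dp
  simpa using h

-- ===== VERDICT (by name: the statement is the Claim_ definition above) =====
theorem solution_spec : Claim_equal_solution := by
  intro s _
  unfold Spec_solution solution solution_alt
  rw [splitOn_eq_pieces]
  have hlen : PySem.Str.len s = (s.toList.length : Int) := by simp [PySem.Str.len_eq]
  rw [hlen]
  cases hcs : s.toList with
  | nil => simp [pieces, show PySem.Chars.startswith [] ['-'] = false from by decide]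
  | cons x xs =>
    simp only [List.isEmpty_cons, List.length_cons, Bool.false_or]
    rw [if_neg (by simp)]
    rw [foldA1 x xs]
    rw [pairC_pieces xs x]
    obtain ⟨p, ps, hp⟩ : ∃ p ps, pieces xs = p :: ps := by
      cases hq : pieces xs with
      | nil => exact absurd hq (pieces_ne_nil xs)
      | cons a b => exact ⟨a, b, rfl⟩
    by_cases hx : x = '+'
    · subst hx
      by_cases hpe : p = [] <;>
        simp [pieces, hp, hpe, List.countP_cons,
          show PySem.Chars.startswith ([] : List Char) ['-'] = false from by decide] <;> ring
    · have hsw : PySem.Chars.startswith (x :: p) ['-'] = true ↔ x = '-' := by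
        rw [PySem.Chars.startswith_iff]; simp [List.cons_prefix_cons, eq_comm]
      by_cases hxm : x = '-'
      · subst hxm
        simp [pieces, hp, hx, hsw]; ring
      · simp [pieces, hp, hx, hsw, hxm]
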